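-- pv_equiv track=rewrite | github.com/VatsalOza11718/Steganography | bis/utils/text.py | text_to_bits
-- ===== SOURCE A (Python) =====
-- def text_to_bits(text: str) -> list[int]:
--     """Convert a UTF-8 string to a list of bits (0/1).
--
--     The encoding format is:
--         [32-bit length header] [payload bits]
--     where the length header stores the number of payload bits.
--     """
--     encoded = text.encode("utf-8")
--     bits: list[int] = []
--     for byte in encoded:
--         # Emit bits most-significant-bit first so encode/decode order stays
--         # deterministic across all BIS hiding backends.
--         for i in range(7, -1, -1):
--             bits.append((byte >> i) & 1)
--
--     # Prepend 32-bit length header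
--     length = len(bits)
--     header = []
--     for i in range(31, -1, -1):
--         header.append((length >> i) & 1)
--
--     return header + bits
-- ===== SOURCE B (Python) =====
-- def text_to_bits(text: str) -> list[int]:
--     encoded = text.encode("utf-8")
--     n = 8 * len(encoded)
--     value = ((n & 0xFFFFFFFF) << n) + int.from_bytes(encoded, "big")
--     width = 32 + n
--     return [int(c) for c in format(value, f"0{width}b")]
-- ===== Notes on version B (the rewrite author's own statement) =====
-- stated objective: idiomatic
-- what changed: Replaces the two explicit bit loops (per-byte MSB loop plus 32-iteration header loop) with packing the masked 32-bit length header and the big-endian payload bytes into one big integer and rendering it in a single zero-padded binary format call.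
import Mathlib
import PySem

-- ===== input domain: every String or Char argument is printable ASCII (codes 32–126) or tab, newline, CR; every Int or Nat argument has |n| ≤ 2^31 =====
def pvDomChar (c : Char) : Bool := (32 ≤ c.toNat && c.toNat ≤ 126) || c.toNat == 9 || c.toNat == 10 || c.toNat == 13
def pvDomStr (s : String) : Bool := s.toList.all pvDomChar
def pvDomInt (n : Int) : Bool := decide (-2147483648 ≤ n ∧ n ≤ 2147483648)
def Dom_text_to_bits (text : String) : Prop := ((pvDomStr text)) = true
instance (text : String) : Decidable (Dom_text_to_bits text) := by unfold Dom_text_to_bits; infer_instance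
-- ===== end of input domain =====

-- B collapses the two bit loops into one big-integer binary rendering (header and payload packed
-- into a single integer); objective: idiomatic/alternative decomposition, same exact output.

-- ===== PORT A =====
-- text.encode('utf-8'): exact on the ASCII domain Dom (every char is one byte = its code point)
def text_to_bits (text : String) : List Int :=
  let encoded : List Nat := text.toList.map (fun c => c.toNat)
  let bits : List Int := encoded.foldl (fun acc byte =>
    (PySem.List.pyRange 7 (-1) (-1)).foldl
      (fun acc2 i => acc2 ++ [(((byte >>> i.toNat) &&& 1 : Nat) : Int)]) acc) []
  let length := bits.length
  let header : List Int := (PySem.List.pyRange 31 (-1) (-1)).foldl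
      (fun acc i => acc ++ [(((length >>> i.toNat) &&& 1 : Nat) : Int)]) []
  header ++ bits

-- ===== PORT B =====
-- '[int(c) for c in format(value, f"0{width}b")]' : bit i (MSB first) of a width-wide value
def pyFormatBits (width : Nat) (value : Nat) : List Int :=
  (List.range width).map (fun i => (((value >>> (width - 1 - i)) &&& 1 : Nat) : Int))

-- text.encode('utf-8'): exact on the ASCII domain Dom
def text_to_bits_alt (text : String) : List Int :=
  let encoded : List Nat := text.toList.map (fun c => c.toNat)
  let n := 8 * encoded.length
  -- ((n & 0xFFFFFFFF) << n) + int.from_bytes(encoded, 'big')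
  let value := ((n &&& 0xFFFFFFFF) <<< n) + encoded.foldl (fun acc b => acc * 256 + b) 0
  pyFormatBits (32 + n) value

-- ===== PRECONDITION & SPEC =====
def Spec_text_to_bits (text : String) (out : List Int) : Prop := out = text_to_bits_alt text
instance (text : String) (out : List Int) : Decidable (Spec_text_to_bits text out) := by unfold Spec_text_to_bits; infer_instance

-- ===== CLAIM (what is proved, stated in full; the proofs are below) =====
def Claim_equal_text_to_bits : Prop := ∀ (text : String), Dom_text_to_bits text → Spec_text_to_bits text (text_to_bits text)

-- ===== LEMMAS AND PROOFS =====

theorem pv_bit_eq (v k : Nat) : (v >>> k) &&& 1 = (v / 2 ^ k) % 2 := by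
  rw [Nat.shiftRight_eq_div_pow, Nat.and_one_is_mod]

-- a low bit of h*2^p + m is the corresponding bit of m
theorem pv_low_bit (h m p s : Nat) (hs : s < p) :
    ((h * 2 ^ p + m) >>> s) &&& 1 = (m >>> s) &&& 1 := by
  rw [pv_bit_eq, pv_bit_eq]
  have hsplit : 2 ^ p = 2 ^ s * 2 ^ (p - s) := by
    rw [← pow_add]; congr 1; omega
  have h1 : (h * 2 ^ p + m) / 2 ^ s = h * 2 ^ (p - s) + m / 2 ^ s := by
    rw [hsplit, show h * (2 ^ s * 2 ^ (p - s)) + m = m + h * 2 ^ (p - s) * 2 ^ s by ring]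
    rw [Nat.add_mul_div_right _ _ (Nat.two_pow_pos s)]
    omega
  rw [h1]
  have h2 : 2 ^ (p - s) = 2 * 2 ^ (p - s - 1) := by
    rw [← pow_succ']; congr 1; omega
  rw [h2, show h * (2 * 2 ^ (p - s - 1)) + m / 2 ^ s
        = 2 * (h * 2 ^ (p - s - 1)) + m / 2 ^ s by ring, Nat.mul_add_mod]

-- a high bit of h*2^p + m (m < 2^p) is the corresponding bit of h
theorem pv_high_bit (h m p k : Nat) (hm : m < 2 ^ p) :
    ((h * 2 ^ p + m) >>> (p + k)) &&& 1 = (h >>> k) &&& 1 := by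
  rw [pv_bit_eq, pv_bit_eq]
  have h1 : (h * 2 ^ p + m) / 2 ^ (p + k) = h / 2 ^ k := by
    rw [pow_add, ← Nat.div_div_eq_div_mul]
    congr 1
    rw [show h * 2 ^ p + m = m + h * 2 ^ p by ring,
        Nat.add_mul_div_right _ _ (Nat.two_pow_pos p),
        Nat.div_eq_of_lt hm]
    omega
  rw [h1]

-- a packed value renders as the concatenation of its two fields
theorem pv_split (w p h m : Nat) (hm : m < 2 ^ p) :
    pyFormatBits (w + p) (h * 2 ^ p + m) = pyFormatBits w h ++ pyFormatBits p m := by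
  unfold pyFormatBits
  rw [List.range_add, List.map_append, List.map_map]
  congr 1
  · refine List.map_congr_left (fun i hi => ?_)
    rw [List.mem_range] at hi
    have : w + p - 1 - i = p + (w - 1 - i) := by omega
    rw [this, pv_high_bit h m p _ hm]
  · refine List.map_congr_left (fun i hi => ?_)
    rw [List.mem_range] at hi
    simp only [Function.comp_apply]
    have : w + p - 1 - (w + i) = p - 1 - i := by omega
    rw [this, pv_low_bit h m p _ (by omega)]

-- only the low w bits matter
theorem pv_formatBits_mod (w v : Nat) : pyFormatBits w v = pyFormatBits w (v % 2 ^ w) := by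
  unfold pyFormatBits
  refine List.map_congr_left (fun i hi => ?_)
  rw [List.mem_range] at hi
  conv_lhs => rw [show v = v / 2 ^ w * 2 ^ w + v % 2 ^ w from (Nat.div_add_mod' v (2 ^ w)).symm]
  rw [pv_low_bit _ _ w _ (by omega)]

def pvFromBytes (bs : List Nat) : Nat := bs.foldl (fun acc b => acc * 256 + b) 0

theorem pv_fromBytes_lt (bs : List Nat) (hb : ∀ b ∈ bs, b < 256) :
    pvFromBytes bs < 2 ^ (8 * bs.length) := by
  induction bs using List.reverseRecOn with
  | nil => simp [pvFromBytes]
  | append_singleton xs x ih =>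
    have hx : x < 256 := hb x (by simp)
    have hxs : pvFromBytes xs < 2 ^ (8 * xs.length) := ih (fun b h => hb b (by simp [h]))
    unfold pvFromBytes at *
    rw [List.foldl_append]
    simp only [List.foldl_cons, List.foldl_nil, List.length_append, List.length_singleton]
    have : 2 ^ (8 * (xs.length + 1)) = 2 ^ (8 * xs.length) * 256 := by
      rw [show 8 * (xs.length + 1) = 8 * xs.length + 8 by ring, pow_add]
      norm_num
    rw [this]
    nlinarith [hxs, hx]

theorem pv_fromBytes_bits (bs : List Nat) (hb : ∀ b ∈ bs, b < 256) :
    pyFormatBits (8 * bs.length) (pvFromBytes bs) = bs.flatMap (fun b => pyFormatBits 8 b) := by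
  induction bs using List.reverseRecOn with
  | nil => simp [pvFromBytes, pyFormatBits]
  | append_singleton xs x ih =>
    have hx : x < 256 := hb x (by simp)
    have hxs := ih (fun b h => hb b (by simp [h]))
    have hfold : pvFromBytes (xs ++ [x]) = pvFromBytes xs * 2 ^ 8 + x := by
      unfold pvFromBytes; rw [List.foldl_append]; norm_num
    rw [hfold, List.length_append, List.length_singleton,
        show 8 * (xs.length + 1) = 8 * xs.length + 8 by ring,
        pv_split _ 8 _ x (by omega), hxs, List.flatMap_append]
    simp

theorem pv_flatMap_length (bs : List Nat) :
    (bs.flatMap (fun b => pyFormatBits 8 b)).length = 8 * bs.length := by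
  induction bs with
  | nil => simp
  | cons x xs ih => simp [pyFormatBits] at *; omega

-- A's inner byte loop is the 8-bit rendering of the byte
theorem pv_byte_loop (byte : Nat) (acc : List Int) :
    (PySem.List.pyRange 7 (-1) (-1)).foldl
      (fun acc2 i => acc2 ++ [(((byte >>> i.toNat) &&& 1 : Nat) : Int)]) acc
    = acc ++ pyFormatBits 8 byte := by
  have hr : PySem.List.pyRange 7 (-1) (-1) = [7, 6, 5, 4, 3, 2, 1, 0] := by decide
  rw [PySem.List.foldl_append_singleton_eq_map, hr]
  simp [pyFormatBits, List.range_succ]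

-- A's header loop is the 32-bit rendering of the length
theorem pv_header_loop (length : Nat) :
    (PySem.List.pyRange 31 (-1) (-1)).foldl
      (fun acc i => acc ++ [(((length >>> i.toNat) &&& 1 : Nat) : Int)]) []
    = pyFormatBits 32 length := by
  have hr : PySem.List.pyRange 31 (-1) (-1) =
      [31, 30, 29, 28, 27, 26, 25, 24, 23, 22, 21, 20, 19, 18, 17, 16,
       15, 14, 13, 12, 11, 10, 9, 8, 7, 6, 5, 4, 3, 2, 1, 0] := by decide
  rw [PySem.List.foldl_append_singleton_eq_map, hr]
  simp [pyFormatBits, List.range_succ]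

theorem pv_payload_loop (encoded : List Nat) :
    encoded.foldl (fun acc byte =>
      (PySem.List.pyRange 7 (-1) (-1)).foldl
        (fun acc2 i => acc2 ++ [(((byte >>> i.toNat) &&& 1 : Nat) : Int)]) acc) []
    = encoded.flatMap (fun b => pyFormatBits 8 b) := by
  have : ∀ acc : List Int, encoded.foldl (fun acc byte =>
      (PySem.List.pyRange 7 (-1) (-1)).foldl
        (fun acc2 i => acc2 ++ [(((byte >>> i.toNat) &&& 1 : Nat) : Int)]) acc) acc
      = acc ++ encoded.flatMap (fun b => pyFormatBits 8 b) := by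
    induction encoded with
    | nil => intro acc; simp
    | cons x xs ih =>
      intro acc
      rw [List.foldl_cons, pv_byte_loop, ih, List.flatMap_cons, List.append_assoc]
  simpa using this []

-- ===== VERDICT (by name: the statement is the Claim_ definition above) =====
theorem text_to_bits_spec : Claim_equal_text_to_bits := by
  intro text hdom
  unfold Spec_text_to_bits text_to_bits text_to_bits_alt
  simp only []
  set encoded : List Nat := text.toList.map (fun c => c.toNat) with henc
  have hb : ∀ b ∈ encoded, b < 256 := by
    intro b hbmem
    rw [henc, List.mem_map] at hbmem
    obtain ⟨c, hc, rfl⟩ := hbmem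
    have := List.all_eq_true.mp hdom c hc
    simp [pvDomChar] at this
    omega
  rw [pv_payload_loop, pv_flatMap_length, pv_header_loop]
  have hmask : 8 * encoded.length &&& 0xFFFFFFFF = 8 * encoded.length % 2 ^ 32 := by
    have := Nat.and_two_pow_sub_one_eq_mod (8 * encoded.length) 32
    norm_num at this ⊢
    exact this
  have hfb : List.foldl (fun acc b => acc * 256 + b) 0 encoded = pvFromBytes encoded := rfl
  rw [hfb, hmask, Nat.shiftLeft_eq,
      pv_split 32 (8 * encoded.length) _ _ (pv_fromBytes_lt encoded hb),
      pv_fromBytes_bits encoded hb, ← pv_formatBits_mod]
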